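-- pv_equiv track=rewrite | github.com/vishaldhakal/esan_backend | tournament/views.py | calculate_rounds_matches
-- ===== SOURCE A (Python) =====
-- import math
--
-- def calculate_rounds_matches(num_teams):
--     try:
--         # Calculate the number of rounds
--         num_rounds = math.ceil(math.log2(num_teams))
--
--         # Calculate the matches for each round
--         matches_per_round = [num_teams // 2**round for round in range(num_rounds, 0, -1)]
--
--         # Reverse the matches_per_round list
--         matches_per_round.reverse()
--
--         return num_rounds, matches_per_round
--     except ValueError:
--         return None
-- ===== SOURCE B (Python) =====
-- def calculate_rounds_matches(num_teams):
--     if num_teams <= 0: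
--         return None
--     # smallest k with 2**k >= num_teams, by doubling (no floats)
--     num_rounds = 0
--     p = 1
--     while p < num_teams:
--         p *= 2
--         num_rounds += 1
--     # build matches forward by repeated halving
--     matches_per_round = []
--     value = num_teams
--     for _ in range(num_rounds):
--         value //= 2
--         matches_per_round.append(value)
--     return num_rounds, matches_per_round
-- ===== Notes on version B (the rewrite author's own statement) =====
-- stated objective: alternative
-- what changed: Replaces the float log2/ceil round count with an integer doubling loop and builds the match list forward with a running floor-halving accumulator instead of mapping powers of two over a reversed countdown range and reversing.
import Mathlib
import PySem

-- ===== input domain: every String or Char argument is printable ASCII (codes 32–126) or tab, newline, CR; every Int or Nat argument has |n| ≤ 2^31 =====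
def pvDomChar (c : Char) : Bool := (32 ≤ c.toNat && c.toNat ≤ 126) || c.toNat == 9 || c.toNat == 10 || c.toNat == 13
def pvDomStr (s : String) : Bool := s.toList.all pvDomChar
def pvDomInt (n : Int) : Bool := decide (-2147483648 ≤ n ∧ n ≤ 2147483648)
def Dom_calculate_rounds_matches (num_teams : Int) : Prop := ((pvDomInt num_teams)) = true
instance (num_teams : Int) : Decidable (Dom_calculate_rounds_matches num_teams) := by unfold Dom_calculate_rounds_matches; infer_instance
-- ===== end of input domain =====

-- B computes the round count by an integer doubling loop and the match list by a running halving accumulator (no floats, no exponentiation, no reverse); same values, alternative algorithm.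


-- ===== PORT A =====
-- math.log2 raises ValueError for num_teams <= 0, caught → None.
-- math.ceil(math.log2 n) is exactly Nat.clog 2 n for 1 ≤ n ≤ 2^31 (double precision suffices on this domain).
def calculate_rounds_matches (num_teams : Int) : Option (Int × List Int) :=
  if num_teams ≤ 0 then none
  else
    let num_rounds : Int := (Nat.clog 2 num_teams.toNat : Int)
    -- [num_teams // 2**round for round in range(num_rounds, 0, -1)] ; round ≥ 1 throughout
    let matches_per_round :=
      (PySem.List.pyRange num_rounds 0 (-1)).map
        (fun r => PySem.Int.floordiv num_teams ((2 : Int) ^ r.toNat))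
    some (num_rounds, matches_per_round.reverse)

-- ===== PORT B =====
-- while p < n: p *= 2; k += 1   (the 0 < p conjunct is only a totality guard; B always starts at p = 1)
def bRounds (n p k : Nat) : Nat :=
  if 0 < p ∧ p < n then bRounds n (2 * p) (k + 1) else k
termination_by n - p
decreasing_by omega

-- for _ in range(k): value //= 2; matches.append(value)
def bMatches : Nat → Int → List Int → Int × List Int
  | 0, v, acc => (v, acc)
  | k + 1, v, acc =>
      bMatches k (PySem.Int.floordiv v 2) (acc ++ [PySem.Int.floordiv v 2])

def calculate_rounds_matches_alt (num_teams : Int) : Option (Int × List Int) :=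
  if num_teams ≤ 0 then none
  else
    let k := bRounds num_teams.toNat 1 0
    some ((k : Int), (bMatches k num_teams []).2)

-- ===== PRECONDITION & SPEC =====
def Spec_calculate_rounds_matches (num_teams : Int) (out : Option (Int × List Int)) : Prop := out = calculate_rounds_matches_alt num_teams
instance (num_teams : Int) (out : Option (Int × List Int)) : Decidable (Spec_calculate_rounds_matches num_teams out) := by unfold Spec_calculate_rounds_matches; infer_instance

-- ===== CLAIM (what is proved, stated in full; the proofs are below) =====
def Claim_equal_calculate_rounds_matches : Prop := ∀ (num_teams : Int), Dom_calculate_rounds_matches num_teams → Spec_calculate_rounds_matches num_teams (calculate_rounds_matches num_teams)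

-- ===== LEMMAS AND PROOFS =====

-- the doubling loop computes Nat.clog 2 n
theorem bRounds_eq_clog (n : Nat) : ∀ d k, Nat.clog 2 n - k = d → k ≤ Nat.clog 2 n →
    bRounds n (2 ^ k) k = Nat.clog 2 n := by
  intro d
  induction d with
  | zero =>
    intro k hd hk
    rw [bRounds]
    have hle : n ≤ 2 ^ k := (Nat.clog_le_iff_le_pow (by norm_num)).mp (by omega)
    rw [if_neg (by omega)]
    omega
  | succ d ih =>
    intro k hd hk
    rw [bRounds]
    by_cases h : 2 ^ k < n
    · rw [if_pos ⟨Nat.two_pow_pos k, h⟩]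
      have hnc : ¬ Nat.clog 2 n ≤ k := by
        intro hc
        exact absurd ((Nat.clog_le_iff_le_pow (by norm_num)).mp hc) (by omega)
      have := ih (k + 1) (by omega) (by omega)
      rw [pow_succ, Nat.mul_comm] at this
      exact this
    · have : Nat.clog 2 n ≤ k := (Nat.clog_le_iff_le_pow (by norm_num)).mpr (by omega)
      omega

-- iterated halving: (v // 2) // 2^m = v // 2^(m+1)
theorem floordiv_floordiv_two (v : Int) (m : Nat) :
    PySem.Int.floordiv (PySem.Int.floordiv v 2) ((2 : Int) ^ m) = PySem.Int.floordiv v ((2 : Int) ^ (m + 1)) := by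
  show Int.fdiv (Int.fdiv v 2) ((2 : Int) ^ m) = Int.fdiv v ((2 : Int) ^ (m + 1))
  rw [Int.fdiv_fdiv_eq_fdiv_mul v (by norm_num) (by positivity), pow_succ, mul_comm]

-- the halving loop builds the forward list of v // 2^(i+1)
theorem bMatches_eq (k : Nat) : ∀ (v : Int) (acc : List Int),
    bMatches k v acc = (PySem.Int.floordiv v ((2 : Int) ^ k),
      acc ++ (List.range k).map (fun i => PySem.Int.floordiv v ((2 : Int) ^ (i + 1)))) := by
  induction k with
  | zero =>
    intro v acc
    simp only [bMatches, pow_zero, List.range_zero, List.map_nil, List.append_nil]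
    show (v, acc) = (Int.fdiv v 1, acc)
    rw [Int.fdiv_one]
  | succ k ih =>
    intro v acc
    rw [bMatches, ih]
    refine Prod.ext ?_ ?_
    · simpa using floordiv_floordiv_two v k
    · simp only [List.range_succ_eq_map, List.map_cons, List.map_map]
      simp only [List.append_assoc, List.singleton_append]
      refine congrArg (acc ++ ·) (congrArg _ ?_)
      refine List.map_congr_left fun i _ => ?_
      simp only [Function.comp_apply]
      simpa using floordiv_floordiv_two v (i + 1)

-- ===== VERDICT (by name: the statement is the Claim_ definition above) =====
theorem calculate_rounds_matches_spec : Claim_equal_calculate_rounds_matches := by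
  intro n _
  unfold Spec_calculate_rounds_matches calculate_rounds_matches calculate_rounds_matches_alt
  by_cases h : n ≤ 0
  · simp [h]
  · rw [if_neg h, if_neg h]
    have hk : bRounds n.toNat 1 0 = Nat.clog 2 n.toNat := by
      have := bRounds_eq_clog n.toNat (Nat.clog 2 n.toNat) 0 rfl (Nat.zero_le _)
      simpa using this
    simp only [hk, bMatches_eq, List.nil_append, PySem.List.pyRange_neg_one_eq_reverse,
      List.map_reverse, List.reverse_reverse, zero_add]
    refine congrArg some (Prod.ext rfl ?_)
    rw [PySem.List.pyRange_one]
    have hKn : ((Nat.clog 2 n.toNat : Int) + 1 - 1).toNat = Nat.clog 2 n.toNat := by omega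
    rw [hKn, List.map_map]
    refine congrArg Prod.snd (Prod.ext rfl ?_)
    refine List.map_congr_left fun i _ => ?_
    simp only [Function.comp_apply]
    have hti : ((1 : Int) + (i : Int)).toNat = i + 1 := by omega
    rw [hti]
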